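-- pv_equiv track=rewrite | github.com/collinsakenga/codewars_solutions | 6 kyu/String subpattern recognition III.py | has_subpattern
-- ===== SOURCE A (Python) =====
-- from collections import Counter
-- from math import gcd
--
-- def has_subpattern(string):
--     check=Counter(string)
--     most=check.most_common()[0][1]
--     least=check.most_common()[-1][1]
--     if most==least:
--         return "".join(sorted(k for k in check.keys()))
--     factors=set()
--     for v in check.values():
--         factors.add(v)
--     factors=list(factors)
--     for i in range(1, len(factors)):
--         factors[i]=gcd(factors[i], factors[i-1])
--     if factors[-1]==1:
--         return "".join(sorted(string))
--     return "".join(sorted(k*(v//factors[-1]) for k,v in check.items()))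
-- ===== SOURCE B (Python) =====
-- def has_subpattern(string):
--     counts = {}
--     for ch in string:
--         counts[ch] = counts.get(ch, 0) + 1
--     r = len(string)
--     while any(v % r for v in counts.values()):
--         r -= 1
--     return "".join(sorted(ch * (v // r) for ch, v in counts.items()))
-- ===== Notes on version B (the rewrite author's own statement) =====
-- stated objective: alternative
-- what changed: B drops Counter/most_common and math.gcd entirely: it counts with a plain dict, finds the largest r <= len(string) dividing every count by a downward linear trial-division search instead of A's set-dedup plus chained gcd pass, and emits one join(sorted(ch*(v//r))) formula in place of A's three result branches.
import Mathlib
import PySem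

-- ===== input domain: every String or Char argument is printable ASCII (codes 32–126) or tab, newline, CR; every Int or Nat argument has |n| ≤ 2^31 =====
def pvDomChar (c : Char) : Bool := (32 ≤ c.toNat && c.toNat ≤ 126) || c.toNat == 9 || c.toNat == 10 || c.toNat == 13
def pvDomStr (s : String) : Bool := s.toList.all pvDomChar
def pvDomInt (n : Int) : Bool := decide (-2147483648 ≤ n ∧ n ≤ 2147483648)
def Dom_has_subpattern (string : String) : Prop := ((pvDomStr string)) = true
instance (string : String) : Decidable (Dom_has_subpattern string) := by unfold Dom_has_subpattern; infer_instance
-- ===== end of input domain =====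

-- B replaces A's Counter/most_common three-branch logic and its set-dedup + chained-gcd pass by a
-- plain dict count and a downward trial-division search for the largest common divisor of the counts,
-- followed by a single output formula; objective: alternative (no speed claim).

-- ===== PORT A =====
-- math.gcd of two ints (A calls it)
def pyGcd (a b : Int) : Int := (Int.gcd a b : Int)

-- Counter keys are the 1-character strings of `string`; they are modelled as Char
-- (Python's ordering on 1-character ASCII strings = Char ordering on code points).
def has_subpattern (string : String) : String :=
  let check := PySem.Dict.counter string.toList
  let mc := PySem.List.sorted check.items (fun kv => kv.2) true        -- check.most_common()
  let most := (PySem.List.pyGetD mc 0 (' ', 0)).2                      -- [0][1]  (Pre_ excludes "", where Python raises IndexError)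
  let least := (PySem.List.pyGetD mc (-1) (' ', 0)).2                  -- [-1][1]
  if most == least then
    String.ofList (PySem.List.sorted check.keys (fun k => k) false)        -- "".join(sorted(keys))
  else
    let factors : List Int := PySem.Set.ofList check.values            -- set() of the counts, as a list
    let factors := (PySem.List.pyRange 1 (factors.length : Int) 1).foldl
      (fun f i => f.set i.toNat (pyGcd (PySem.List.pyGetD f i 0) (PySem.List.pyGetD f (i - 1) 0))) factors
    if PySem.List.pyGetD factors (-1) 0 == 1 then
      String.ofList (PySem.List.sorted string.toList (fun c => c) false)   -- "".join(sorted(string))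
    else
      PySem.Str.join "" (PySem.List.sorted
        (check.items.map (fun kv =>
          String.ofList (PySem.List.pyRepeat [kv.1]
            (PySem.Int.floordiv kv.2 (PySem.List.pyGetD factors (-1) 0)))))
        (fun s => s) false)

-- ===== PORT B =====
-- the while loop `while any(v % r for v in counts.values()): r -= 1`, as structural recursion on r
def findR (vals : List Int) : Nat → Nat
  | 0 => 0
  | r + 1 =>
    if vals.any (fun v => PySem.Int.mod v ((r + 1 : Nat) : Int) != 0) then findR vals r
    else r + 1

def has_subpattern_alt (string : String) : String :=
  let counts := string.toList.foldl (fun d ch => d.insert ch (d.getD ch 0 + 1)) PySem.Dict.empty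
  let r := findR counts.values string.toList.length
  PySem.Str.join "" (PySem.List.sorted
    (counts.items.map (fun kv =>
      String.ofList (PySem.List.pyRepeat [kv.1] (PySem.Int.floordiv kv.2 ((r : Nat) : Int)))))
    (fun t => t) false)

-- ===== PRECONDITION & SPEC =====
-- Pre_ excludes only the empty string, on which A raises IndexError.
def Pre_has_subpattern (string : String) : Prop := string ≠ ""
instance (string : String) : Decidable (Pre_has_subpattern string) := by unfold Pre_has_subpattern; infer_instance
def pvWitness_has_subpattern : String := "abab"

def Spec_has_subpattern (string : String) (out : String) : Prop := out = has_subpattern_alt string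
instance (string : String) (out : String) : Decidable (Spec_has_subpattern string out) := by unfold Spec_has_subpattern; infer_instance

-- ===== CLAIM (what is proved, stated in full; the proofs are below) =====
def Claim_equal_has_subpattern : Prop := ∀ (string : String), Dom_has_subpattern string → Pre_has_subpattern string → Spec_has_subpattern string (has_subpattern string)

-- ===== LEMMAS AND PROOFS =====

def natG (a : Nat) (l : List Int) : Nat := l.foldl (fun x v => Nat.gcd x v.natAbs) a

theorem dvd_natG_iff (d a : Nat) (l : List Int) : d ∣ natG a l ↔ d ∣ a ∧ ∀ v ∈ l, d ∣ v.natAbs := by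
  induction l generalizing a with
  | nil => simp [natG]
  | cons v t ih =>
    simp only [natG, List.foldl_cons] at *
    rw [ih]
    constructor
    · rintro ⟨h1, h2⟩
      exact ⟨(Nat.dvd_gcd_iff.mp h1).1, by
        intro w hw
        rcases List.mem_cons.mp hw with hw' | hw'
        · subst hw'; exact (Nat.dvd_gcd_iff.mp h1).2
        · exact h2 w hw'⟩
    · rintro ⟨h1, h2⟩
      exact ⟨Nat.dvd_gcd h1 (h2 v (by simp)), fun w hw => h2 w (by simp [hw])⟩

theorem natG_eq_of_dvd_iff {a a' : Nat} {l l' : List Int}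
    (h : ∀ d, (d ∣ a ∧ ∀ v ∈ l, d ∣ v.natAbs) ↔ (d ∣ a' ∧ ∀ v ∈ l', d ∣ v.natAbs)) :
    natG a l = natG a' l' := by
  apply Nat.dvd_antisymm
  · exact (dvd_natG_iff _ _ _).mpr ((h _).mp ((dvd_natG_iff _ _ _).mp dvd_rfl))
  · exact (dvd_natG_iff _ _ _).mpr ((h _).mpr ((dvd_natG_iff _ _ _).mp dvd_rfl))

theorem natG_pos {a : Nat} (ha : 0 < a) (l : List Int) : 0 < natG a l := by
  induction l generalizing a with
  | nil => simpa [natG]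
  | cons v t ih =>
    simpa [natG] using ih (Nat.gcd_pos_of_pos_left _ ha)

-- A-side helper facts about the in-place chained-gcd pass
theorem foldl_pyGcd_eq {x : Int} (hx : 0 ≤ x) (l : List Int) : l.foldl pyGcd x = (natG x.natAbs l : Int) := by
  induction l generalizing x with
  | nil => simp [natG, Int.natAbs_of_nonneg hx]
  | cons v t ih =>
    simp only [List.foldl_cons, natG] at *
    rw [ih (by unfold pyGcd; exact Int.natCast_nonneg _)]
    simp [pyGcd, Int.gcd]

theorem chain_step_append (is : List Int) (ys : List Int) (x : Int)
    (h : ∀ i ∈ is, 1 ≤ i ∧ i < (ys.length : Int)) :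
    is.foldl (fun f i => f.set i.toNat (pyGcd (PySem.List.pyGetD f i 0) (PySem.List.pyGetD f (i - 1) 0))) (ys ++ [x])
      = (is.foldl (fun f i => f.set i.toNat (pyGcd (PySem.List.pyGetD f i 0) (PySem.List.pyGetD f (i - 1) 0))) ys) ++ [x] := by
  induction is generalizing ys with
  | nil => simp
  | cons i t ih =>
    obtain ⟨h1, h2⟩ := h i (by simp)
    have h0 : (0:Int) ≤ i := by omega
    have hlt : i.toNat < ys.length := by omega
    simp only [List.foldl_cons]
    have e1 : PySem.List.pyGetD (ys ++ [x]) i 0 = PySem.List.pyGetD ys i 0 := by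
      rw [PySem.List.pyGetD_eq_getElem _ _ h0 (by simp; omega),
          PySem.List.pyGetD_eq_getElem _ _ h0 (by exact_mod_cast h2)]
      exact List.getElem_append_left hlt
    have e2 : PySem.List.pyGetD (ys ++ [x]) (i - 1) 0 = PySem.List.pyGetD ys (i - 1) 0 := by
      rw [PySem.List.pyGetD_eq_getElem _ _ (by omega) (by simp; omega),
          PySem.List.pyGetD_eq_getElem _ _ (by omega) (by omega)]
      exact List.getElem_append_left (by omega)
    have e3 : (ys ++ [x]).set i.toNat (pyGcd (PySem.List.pyGetD ys i 0) (PySem.List.pyGetD ys (i - 1) 0))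
        = ys.set i.toNat (pyGcd (PySem.List.pyGetD ys i 0) (PySem.List.pyGetD ys (i - 1) 0)) ++ [x] := by
      rw [List.set_append, if_pos hlt]
    rw [e1, e2, e3, ih]
    intro j hj
    have := h j (by simp [hj])
    simpa using this

theorem chain_length (is : List Int) (ys : List Int) :
    (is.foldl (fun f i => f.set i.toNat (pyGcd (PySem.List.pyGetD f i 0) (PySem.List.pyGetD f (i - 1) 0))) ys).length = ys.length := by
  induction is generalizing ys with
  | nil => rfl
  | cons i t ih => simp [ih]

theorem chain_getLast (x : Int) (l : List Int) :
    ((PySem.List.pyRange 1 (((x :: l).length : Nat) : Int) 1).foldl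
      (fun f i => f.set i.toNat (pyGcd (PySem.List.pyGetD f i 0) (PySem.List.pyGetD f (i - 1) 0)))
      (x :: l)).getLast? = some (l.foldl pyGcd x) := by
  induction l using List.reverseRecOn with
  | nil =>
    norm_num
  | append_singleton t v ih =>
    have hlen : (((x :: (t ++ [v])).length : Nat) : Int) = ((x :: t).length : Int) + 1 := by
      simp
    rw [hlen, PySem.List.pyRange_one_succ_right (by simp), List.foldl_append]
    have hys : x :: (t ++ [v]) = (x :: t) ++ [v] := by simp
    rw [hys, chain_step_append _ _ _ (by intro i hi; simpa using (PySem.List.mem_pyRange_one.mp hi))]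
    set C := (PySem.List.pyRange 1 ((x :: t).length : Int) 1).foldl
      (fun f i => f.set i.toNat (pyGcd (PySem.List.pyGetD f i 0) (PySem.List.pyGetD f (i - 1) 0))) (x :: t) with hC
    have hClen : C.length = (x :: t).length := chain_length _ _
    have hg : C.getLast? = some (t.foldl pyGcd x) := ih
    have hCne : C ≠ [] := by
      intro hc; rw [hc] at hClen; simp at hClen
    simp only [List.foldl_cons, List.foldl_nil]
    have hi1 : (((x :: t).length : Int)).toNat = C.length := by simp [hClen]
    have hi2 : ((((x :: t).length : Int)) - 1).toNat = C.length - 1 := by omega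
    have e1 : PySem.List.pyGetD (C ++ [v]) ((x :: t).length : Int) 0 = v := by
      rw [PySem.List.pyGetD_eq_getElem _ _ (by positivity) (by simp [hClen])]
      rw [List.getElem_append_right (by omega)]
      simp
    have e2 : PySem.List.pyGetD (C ++ [v]) (((x :: t).length : Int) - 1) 0 = t.foldl pyGcd x := by
      have h0 : (0:Int) ≤ ((x :: t).length : Int) - 1 := by simp only [List.length_cons]; omega
      rw [PySem.List.pyGetD_of_nonneg _ _ h0, hi2]
      have hlast : C.getLast hCne = t.foldl pyGcd x := by
        have h2 := List.getLast?_eq_some_getLast hCne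
        rw [h2] at hg; exact Option.some.inj hg
      rw [List.getD_eq_getElem _ _ (by simp only [List.length_append, List.length_nil, List.length_cons]; omega), List.getElem_append_left (by omega),
          ← hlast, List.getLast_eq_getElem]
    rw [e1, e2, List.set_append, if_neg (by omega)]
    have hset : [v].set ((((x :: t).length : Int)).toNat - C.length) (pyGcd v (t.foldl pyGcd x)) = [pyGcd v (t.foldl pyGcd x)] := by
      rw [hi1]
      simp
    rw [hset]
    rw [List.foldl_append]
    simp only [List.foldl_cons, List.foldl_nil]
    rw [List.getLast?_concat]
    simp [pyGcd, Int.gcd_comm]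

theorem pyGetD_neg_one {α : Type} (xs : List α) (d : α) (h : xs ≠ []) :
    PySem.List.pyGetD xs (-1) d = xs.getLast h := by
  have hlen : 0 < xs.length := List.length_pos_iff.mpr h
  simp only [PySem.List.pyGetD, PySem.List.pyGet?, PySem.List.pyIdx?]
  rw [if_neg (by omega), if_pos (by omega)]
  simp only [Option.bind_some]
  rw [List.getLast_eq_getElem]
  rw [List.getElem?_eq_getElem (by omega)]
  simp

theorem join_empty_sep (parts : List (List Char)) : PySem.Chars.join [] parts = parts.flatten := by
  induction parts with
  | nil => simp [PySem.Chars.join_nil]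
  | cons p rest ih =>
    cases rest with
    | nil => simp [PySem.Chars.join_singleton]
    | cons q r =>
      rw [PySem.Chars.join_cons_cons]
      simp only [List.flatten_cons]
      rw [ih]
      simp

theorem pairwise_lt_sorted_nodup (K : List Char) (hK : K.Nodup) :
    (PySem.List.sorted K (fun k => k) false).Pairwise (· < ·) := by
  have hle := PySem.List.sorted_pairwise K (fun k => k)
  have hnd : (PySem.List.sorted K (fun k => k) false).Nodup :=
    ((PySem.List.sorted_perm K (fun k => k) false).nodup_iff).mpr hK
  exact (hle.and hnd).imp (fun h => lt_of_le_of_ne h.1 h.2)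

theorem repl_lt {k k' : Char} (h : k < k') {n m : Nat} (hn : 0 < n) (hm : 0 < m) :
    String.ofList (List.replicate n k) < String.ofList (List.replicate m k') := by
  rw [String.lt_iff_toList_lt]
  simp only [String.toList_ofList]
  obtain ⟨n', rfl⟩ : ∃ n', n = n' + 1 := ⟨n - 1, by omega⟩
  obtain ⟨m', rfl⟩ : ∃ m', m = m' + 1 := ⟨m - 1, by omega⟩
  simp only [List.replicate_succ]
  exact List.cons_lt_cons_iff.mpr (Or.inl h)

theorem sorted_blocks (K : List Char) (hK : K.Nodup) (n : Char → Nat) (hn : ∀ k ∈ K, 0 < n k) :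
    PySem.List.sorted (K.map (fun k => String.ofList (List.replicate (n k) k))) (fun s => s) false
      = (PySem.List.sorted K (fun k => k) false).map (fun k => String.ofList (List.replicate (n k) k)) := by
  apply PySem.List.sorted_eq_of_perm_of_pairwise_lt
  · exact (PySem.List.sorted_perm K (fun k => k) false).map _
  · rw [List.pairwise_map]
    refine List.Pairwise.imp_of_mem ?_ (pairwise_lt_sorted_nodup K hK)
    intro a b ha hb hab
    exact repl_lt hab (hn a ((PySem.List.mem_sorted _ _ _ _).mp ha)) (hn b ((PySem.List.mem_sorted _ _ _ _).mp hb))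

theorem join_blocks (K : List Char) (hK : K.Nodup) (n : Char → Nat) (hn : ∀ k ∈ K, 0 < n k) :
    PySem.Str.join "" (PySem.List.sorted (K.map (fun k => String.ofList (List.replicate (n k) k))) (fun s => s) false)
      = String.ofList ((PySem.List.sorted K (fun k => k) false).flatMap (fun k => List.replicate (n k) k)) := by
  rw [sorted_blocks K hK n hn]
  have hext : ∀ (u : String) (l : List Char), u.toList = l → u = String.ofList l := by
    rintro u l rfl; exact (String.ofList_toList).symm
  apply hext
  rw [PySem.Str.toList_join]
  simp only [List.map_map]
  have : (String.toList ∘ fun k => String.ofList (List.replicate (n k) k)) = fun k => List.replicate (n k) k := by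
    funext k; simp
  rw [this]
  have hsep : ("" : String).toList = [] := rfl
  rw [hsep, join_empty_sep, List.flatMap]

theorem count_flatMap_replicate (S : List Char) (hS : S.Nodup) (m : Char → Nat) (a : Char) :
    (S.flatMap (fun k => List.replicate (m k) k)).count a = if a ∈ S then m a else 0 := by
  induction S with
  | nil => simp
  | cons k t ih =>
    simp only [List.flatMap_cons, List.count_append, List.count_replicate]
    rw [ih hS.of_cons]
    rcases eq_or_ne k a with rfl | hk
    · have hnt : k ∉ t := (List.nodup_cons.mp hS).1
      simp [hnt]
    · by_cases ht : a ∈ t <;> simp [hk, ht, Ne.symm hk]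

theorem sorted_eq_flatMap (cs : List Char) :
    PySem.List.sorted cs (fun c => c) false
      = (PySem.List.sorted (PySem.Set.ofList cs) (fun k => k) false).flatMap (fun k => List.replicate (cs.count k) k) := by
  have hK : (PySem.Set.ofList cs).Nodup := PySem.Set.nodup_ofList cs
  have hS : (PySem.List.sorted (PySem.Set.ofList cs) (fun k => k) false).Nodup :=
    ((PySem.List.sorted_perm _ (fun k => k) false).nodup_iff).mpr hK
  apply PySem.List.sorted_id_eq_of_perm_of_pairwise
  · rw [List.perm_iff_count]
    intro a
    rw [count_flatMap_replicate _ hS]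
    by_cases ha : a ∈ cs
    · simp [PySem.List.mem_sorted, PySem.Set.mem_ofList, ha]
    · simp [PySem.List.mem_sorted, PySem.Set.mem_ofList, ha, List.count_eq_zero_of_not_mem ha]
  · rw [List.flatMap, List.pairwise_flatten]
    constructor
    · intro l hl
      simp only [List.mem_map] at hl
      obtain ⟨k, _, rfl⟩ := hl
      exact List.pairwise_replicate.mpr (Or.inr le_rfl)
    · rw [List.pairwise_map]
      apply (PySem.List.sorted_pairwise _ (fun k => k)).imp
      intro a b hab x hx y hy
      rw [List.eq_of_mem_replicate hx, List.eq_of_mem_replicate hy]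
      exact hab

theorem flatten_map_singleton {α : Type} (l : List α) : l = (List.map (fun a => [a]) l).flatten := by
  induction l with
  | nil => rfl
  | cons a t ih => simpa using ih

theorem getLast_sorted_rev_min {α κ : Type} [LinearOrder κ] (xs : List α) (key : α → κ) {m : α}
    (h : (PySem.List.sorted xs key true).getLast? = some m) : ∀ y ∈ xs, key m ≤ key y := by
  have hp := PySem.List.sorted_pairwise_rev xs key
  intro y hy
  have hy' : y ∈ (PySem.List.sorted xs key true).reverse := by
    simpa [PySem.List.mem_sorted] using hy
  have hrev : (PySem.List.sorted xs key true).reverse.head? = some m := by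
    rw [List.head?_reverse]; exact h
  obtain ⟨rest, hr⟩ : ∃ rest, (PySem.List.sorted xs key true).reverse = m :: rest := by
    cases hl' : (PySem.List.sorted xs key true).reverse with
    | nil => rw [hl'] at hrev; simp at hrev
    | cons a r =>
      rw [hl'] at hrev
      simp only [List.head?_cons, Option.some.injEq] at hrev
      exact ⟨r, by rw [hrev]⟩
  have hpr : (PySem.List.sorted xs key true).reverse.Pairwise (fun a b => key a ≤ key b) := by
    rw [List.pairwise_reverse]
    exact hp
  rw [hr] at hpr
  rw [hr] at hy'
  rcases List.mem_cons.mp hy' with rfl | hmem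
  · exact le_rfl
  · exact (List.pairwise_cons.mp hpr).1 y hmem

theorem formula_join (cs : List Char) (NG : Nat) (hNGpos : 0 < NG)
    (hdvd : ∀ k ∈ PySem.Set.ofList cs, NG ∣ cs.count k) :
    PySem.Str.join "" (PySem.List.sorted
      ((PySem.Dict.counter cs).items.map (fun kv =>
        String.ofList (PySem.List.pyRepeat [kv.1] (PySem.Int.floordiv kv.2 ((NG : Nat) : Int)))))
      (fun s => s) false)
      = String.ofList ((PySem.List.sorted (PySem.Set.ofList cs) (fun k => k) false).flatMap
          (fun k => List.replicate (cs.count k / NG) k)) := by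
  have hK : (PySem.Set.ofList cs).Nodup := PySem.Set.nodup_ofList cs
  have hcntpos : ∀ k ∈ PySem.Set.ofList cs, 0 < cs.count k := by
    intro k hk
    exact List.count_pos_iff.mpr ((PySem.Set.mem_ofList cs k).mp hk)
  have hmap : (PySem.Dict.counter cs).items.map (fun kv =>
        String.ofList (PySem.List.pyRepeat [kv.1] (PySem.Int.floordiv kv.2 ((NG : Nat) : Int))))
      = (PySem.Set.ofList cs).map (fun k => String.ofList (List.replicate (cs.count k / NG) k)) := by
    rw [PySem.Dict.items_counter, List.map_map]
    apply List.map_congr_left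
    intro k hk
    have h1 : PySem.Int.floordiv ((cs.count k : Nat) : Int) ((NG : Nat) : Int)
        = ((cs.count k / NG : Nat) : Int) := PySem.Int.floordiv_natCast _ _
    simp only [Function.comp_apply, h1, PySem.List.pyRepeat_singleton, Int.toNat_natCast]
  rw [hmap]
  exact join_blocks _ hK _ (fun k hk => Nat.div_pos (Nat.le_of_dvd (hcntpos k hk) (hdvd k hk)) hNGpos)

-- B's while loop finds the largest r ≤ fuel dividing every value, i.e. the gcd G when G ≤ fuel
theorem findR_eq (vals : List Int) (G : Nat) (hGpos : 0 < G)
    (hdvd : ∀ v ∈ vals, (G : Int) ∣ v)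
    (hmax : ∀ r : Nat, (∀ v ∈ vals, (r : Int) ∣ v) → r ∣ G) :
    ∀ fuel : Nat, G ≤ fuel → findR vals fuel = G := by
  intro fuel
  induction fuel with
  | zero => intro h; omega
  | succ r ih =>
    intro hle
    unfold findR
    rcases eq_or_lt_of_le hle with heq | hlt
    · rw [if_neg]
      · omega
      · simp only [List.any_eq_true, bne_iff_ne, ne_eq, not_exists, not_and, not_not]
        intro v hv
        rw [PySem.Int.mod_eq_zero_iff_dvd]
        exact heq ▸ hdvd v hv
    · rw [if_pos]
      · exact ih (by omega)
      · by_contra hall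
        simp only [List.any_eq_true, bne_iff_ne, ne_eq, not_exists, not_and, not_not] at hall
        have : (r + 1) ∣ G := by
          apply hmax
          intro v hv
          rw [← PySem.Int.mod_eq_zero_iff_dvd]
          exact_mod_cast hall v hv
        have := Nat.le_of_dvd hGpos this
        omega

theorem main_eq (s : String) (hpre : s.toList ≠ []) : has_subpattern s = has_subpattern_alt s := by
  set cs := s.toList with hcs
  obtain ⟨k0, krest, hKeq⟩ := List.exists_cons_of_ne_nil
    (show PySem.Set.ofList cs ≠ [] by
      obtain ⟨c, t, hct⟩ := List.exists_cons_of_ne_nil hpre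
      intro hnil
      have hmem : c ∈ PySem.Set.ofList cs := (PySem.Set.mem_ofList cs c).mpr (by rw [hct]; simp)
      rw [hnil] at hmem; simp at hmem)
  have hk0K : k0 ∈ PySem.Set.ofList cs := by rw [hKeq]; simp
  have hk0cs : k0 ∈ cs := (PySem.Set.mem_ofList cs k0).mp hk0K
  have hvalues : (PySem.Dict.counter cs).values
      = ((cs.count k0 : Nat) : Int) :: krest.map (fun k => ((cs.count k : Nat) : Int)) := by
    unfold PySem.Dict.values
    rw [PySem.Dict.items_counter, List.map_map, hKeq]
    simp
  set NG := natG (cs.count k0) (krest.map (fun k => ((cs.count k : Nat) : Int))) with hNG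
  have hNGd := (dvd_natG_iff NG (cs.count k0) (krest.map (fun k => ((cs.count k : Nat) : Int)))).mp dvd_rfl
  have hNGdvd : ∀ k ∈ PySem.Set.ofList cs, NG ∣ cs.count k := by
    intro k hk
    rw [hKeq] at hk
    rcases List.mem_cons.mp hk with rfl | hk'
    · exact hNGd.1
    · simpa using hNGd.2 _ (List.mem_map_of_mem hk')
  have hcpos : 0 < cs.count k0 := List.count_pos_iff.mpr hk0cs
  have hNGpos : 0 < NG := natG_pos hcpos _
  have hdvd_iff_values : ∀ d : Nat, (d ∣ cs.count k0 ∧ ∀ v ∈ krest.map (fun k => ((cs.count k : Nat) : Int)), d ∣ v.natAbs)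
      ↔ (∀ v ∈ (PySem.Dict.counter cs).values, d ∣ v.natAbs) := by
    intro d
    rw [hvalues]
    constructor
    · rintro ⟨h1, h2⟩ v hv
      rcases List.mem_cons.mp hv with rfl | hv'
      · simpa using h1
      · exact h2 v hv'
    · intro h
      refine ⟨?_, fun v hv => h v (List.mem_cons_of_mem _ hv)⟩
      simpa using h ((cs.count k0 : Nat) : Int) List.mem_cons_self
  -- B's value
  have hB : has_subpattern_alt s
      = String.ofList ((PySem.List.sorted (PySem.Set.ofList cs) (fun k => k) false).flatMap
          (fun k => List.replicate (cs.count k / NG) k)) := by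
    rw [show has_subpattern_alt s
      = PySem.Str.join "" (PySem.List.sorted
        ((PySem.Dict.counter cs).items.map (fun kv =>
          String.ofList (PySem.List.pyRepeat [kv.1]
            (PySem.Int.floordiv kv.2 ((findR (PySem.Dict.counter cs).values cs.length : Nat) : Int)))))
        (fun t => t) false) from rfl]
    have hfind : findR (PySem.Dict.counter cs).values cs.length = NG := by
      apply findR_eq _ _ hNGpos
      · intro v hv
        rw [hvalues] at hv
        rcases List.mem_cons.mp hv with rfl | hv'
        · exact_mod_cast Int.natCast_dvd_natCast.mpr hNGd.1
        · obtain ⟨k, hkmem, rfl⟩ := List.mem_map.mp hv'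
          have hkK : k ∈ PySem.Set.ofList cs := by rw [hKeq]; simp [hkmem]
          exact_mod_cast Int.natCast_dvd_natCast.mpr (hNGdvd k hkK)
      · intro r hr
        rw [hNG]
        rw [dvd_natG_iff]
        constructor
        · have := hr ((cs.count k0 : Nat) : Int) (by rw [hvalues]; simp)
          exact_mod_cast this
        · intro v hv
          have hvmem : v ∈ (PySem.Dict.counter cs).values := by
            rw [hvalues]; exact List.mem_cons_of_mem _ hv
          have := hr v hvmem
          obtain ⟨k, _, rfl⟩ := List.mem_map.mp hv
          simpa using Int.natCast_dvd_natCast.mp (by simpa using this)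
      · calc NG ≤ cs.count k0 := Nat.le_of_dvd hcpos hNGd.1
          _ ≤ cs.length := List.count_le_length
    rw [hfind]
    exact formula_join cs NG hNGpos hNGdvd
  -- A's value, by cases on its branches
  rw [show has_subpattern s = (
      if (PySem.List.pyGetD (PySem.List.sorted (PySem.Dict.counter cs).items (fun kv => kv.2) true) 0 (' ', 0)).2
          == (PySem.List.pyGetD (PySem.List.sorted (PySem.Dict.counter cs).items (fun kv => kv.2) true) (-1) (' ', 0)).2 then
        String.ofList (PySem.List.sorted (PySem.Dict.counter cs).keys (fun k => k) false)
      else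
        if PySem.List.pyGetD
            ((PySem.List.pyRange 1 (((PySem.Set.ofList (PySem.Dict.counter cs).values : List Int).length : Nat) : Int) 1).foldl
              (fun f i => f.set i.toNat (pyGcd (PySem.List.pyGetD f i 0) (PySem.List.pyGetD f (i - 1) 0)))
              (PySem.Set.ofList (PySem.Dict.counter cs).values)) (-1) 0 == 1 then
          String.ofList (PySem.List.sorted cs (fun c => c) false)
        else
          PySem.Str.join "" (PySem.List.sorted
            ((PySem.Dict.counter cs).items.map (fun kv =>
              String.ofList (PySem.List.pyRepeat [kv.1]
                (PySem.Int.floordiv kv.2 (PySem.List.pyGetD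
                  ((PySem.List.pyRange 1 (((PySem.Set.ofList (PySem.Dict.counter cs).values : List Int).length : Nat) : Int) 1).foldl
                    (fun f i => f.set i.toNat (pyGcd (PySem.List.pyGetD f i 0) (PySem.List.pyGetD f (i - 1) 0)))
                    (PySem.Set.ofList (PySem.Dict.counter cs).values)) (-1) 0)))))
            (fun t => t) false)) from rfl]
  have hitems : (PySem.Dict.counter cs).items
      = (k0 :: krest).map (fun k => (k, ((cs.count k : Nat) : Int))) := by
    rw [PySem.Dict.items_counter, hKeq]
  have hitemsne : (PySem.Dict.counter cs).items ≠ [] := by rw [hitems]; simp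
  have hMCne : PySem.List.sorted (PySem.Dict.counter cs).items (fun kv => kv.2) true ≠ [] := by
    intro h; exact hitemsne ((PySem.List.sorted_eq_nil_iff _ _ _).mp h)
  obtain ⟨m0, mt, hMCeq⟩ := List.exists_cons_of_ne_nil hMCne
  have hget0 : PySem.List.pyGetD (PySem.List.sorted (PySem.Dict.counter cs).items (fun kv => kv.2) true) 0 (' ', 0) = m0 := by
    rw [PySem.List.pyGetD_of_nonneg _ _ le_rfl, hMCeq]; simp
  have hgetL : PySem.List.pyGetD (PySem.List.sorted (PySem.Dict.counter cs).items (fun kv => kv.2) true) (-1) (' ', 0)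
      = (PySem.List.sorted (PySem.Dict.counter cs).items (fun kv => kv.2) true).getLast hMCne :=
    pyGetD_neg_one _ _ hMCne
  rw [hget0, hgetL]
  by_cases hml : m0.2 = ((PySem.List.sorted (PySem.Dict.counter cs).items (fun kv => kv.2) true).getLast hMCne).2
  · -- all counts are equal
    rw [if_pos (by simpa using hml)]
    have hmax : ∀ y ∈ (PySem.Dict.counter cs).items, y.2 ≤ m0.2 :=
      PySem.List.key_head_sorted_rev_ge (PySem.Dict.counter cs).items (fun kv : Char × Int => kv.2) hMCeq
    have hmin : ∀ y ∈ (PySem.Dict.counter cs).items,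
        ((PySem.List.sorted (PySem.Dict.counter cs).items (fun kv => kv.2) true).getLast hMCne).2 ≤ y.2 :=
      getLast_sorted_rev_min (PySem.Dict.counter cs).items (fun kv : Char × Int => kv.2) (List.getLast?_eq_some_getLast hMCne)
    have hallEq : ∀ y ∈ (PySem.Dict.counter cs).items, y.2 = m0.2 := by
      intro y hy
      exact le_antisymm (hmax y hy) (hml ▸ hmin y hy)
    have hcntEq : ∀ k ∈ PySem.Set.ofList cs, ((cs.count k : Nat) : Int) = m0.2 := by
      intro k hk
      have : (k, ((cs.count k : Nat) : Int)) ∈ (PySem.Dict.counter cs).items := by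
        rw [hitems]
        exact List.mem_map_of_mem (hKeq ▸ hk)
      simpa using hallEq _ this
    have hcnt0 : ((cs.count k0 : Nat) : Int) = m0.2 := hcntEq k0 hk0K
    have hcntNat : ∀ k ∈ PySem.Set.ofList cs, cs.count k = cs.count k0 := by
      intro k hk
      have := (hcntEq k hk).trans hcnt0.symm
      exact_mod_cast this
    have hNGeq : NG = cs.count k0 := by
      rw [hNG]
      have : natG (cs.count k0) [] = cs.count k0 := rfl
      rw [← this]
      apply natG_eq_of_dvd_iff
      intro d
      constructor
      · rintro ⟨h1, _⟩; exact ⟨h1, by simp⟩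
      · rintro ⟨h1, _⟩
        refine ⟨h1, ?_⟩
        intro v hv
        obtain ⟨k, hkmem, rfl⟩ := List.mem_map.mp hv
        have hkK : k ∈ PySem.Set.ofList cs := by rw [hKeq]; simp [hkmem]
        simpa [hcntNat k hkK] using h1
    rw [hB, PySem.Dict.keys_counter]
    congr 1
    have : ∀ k ∈ PySem.List.sorted (PySem.Set.ofList cs) (fun k => k) false,
        List.replicate (cs.count k / NG) k = [k] := by
      intro k hk
      have hkK : k ∈ PySem.Set.ofList cs := (PySem.List.mem_sorted _ _ _ _).mp hk
      rw [hcntNat k hkK, ← hNGeq, Nat.div_self hNGpos]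
      rfl
    rw [List.flatMap, List.map_congr_left this]
    exact flatten_map_singleton _
  · rw [if_neg (by simpa using hml)]
    -- A's chained gcd equals the gcd NG
    have hF0ne : (PySem.Set.ofList (PySem.Dict.counter cs).values : List Int) ≠ [] := by
      intro h
      have : ((cs.count k0 : Nat) : Int) ∈ PySem.Set.ofList (PySem.Dict.counter cs).values :=
        (PySem.Set.mem_ofList _ _).mpr (by rw [hvalues]; simp)
      rw [h] at this; simp at this
    obtain ⟨f0, frest, hF0eq⟩ := List.exists_cons_of_ne_nil hF0ne
    have hf0mem : f0 ∈ (PySem.Dict.counter cs).values := by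
      refine (PySem.Set.mem_ofList _ _).mp ?_
      rw [hF0eq]; simp
    have hf0nonneg : 0 ≤ f0 := by
      rw [hvalues] at hf0mem
      rcases List.mem_cons.mp hf0mem with rfl | h'
      · positivity
      · obtain ⟨k, _, rfl⟩ := List.mem_map.mp h'
        positivity
    have hgA : PySem.List.pyGetD
        ((PySem.List.pyRange 1 (((PySem.Set.ofList (PySem.Dict.counter cs).values : List Int).length : Nat) : Int) 1).foldl
          (fun f i => f.set i.toNat (pyGcd (PySem.List.pyGetD f i 0) (PySem.List.pyGetD f (i - 1) 0)))
          (PySem.Set.ofList (PySem.Dict.counter cs).values)) (-1) 0 = ((NG : Nat) : Int) := by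
      rw [hF0eq]
      have hCH := chain_getLast f0 frest
      set CH := (PySem.List.pyRange 1 (((f0 :: frest).length : Nat) : Int) 1).foldl
        (fun f i => f.set i.toNat (pyGcd (PySem.List.pyGetD f i 0) (PySem.List.pyGetD f (i - 1) 0)))
        (f0 :: frest) with hCHdef
      have hCHne : CH ≠ [] := by
        intro h
        have := chain_length (PySem.List.pyRange 1 (((f0 :: frest).length : Nat) : Int) 1) (f0 :: frest)
        rw [← hCHdef, h] at this
        simp at this
      rw [pyGetD_neg_one _ _ hCHne]
      have : CH.getLast hCHne = frest.foldl pyGcd f0 := by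
        have h2 := List.getLast?_eq_some_getLast hCHne
        rw [h2] at hCH
        exact Option.some.inj hCH
      rw [this, foldl_pyGcd_eq hf0nonneg]
      congr 1
      rw [hNG]
      apply natG_eq_of_dvd_iff
      intro d
      rw [hdvd_iff_values d]
      constructor
      · rintro ⟨h1, h2⟩ v hv
        have hvF : v ∈ (f0 :: frest) := by
          rw [← hF0eq]
          exact (PySem.Set.mem_ofList _ _).mpr hv
        rcases List.mem_cons.mp hvF with rfl | h'
        · exact h1
        · exact h2 v h'
      · intro h
        have hmem : ∀ v ∈ (f0 :: frest), d ∣ v.natAbs := by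
          intro v hv
          refine h v ?_
          refine (PySem.Set.mem_ofList _ _).mp ?_
          rw [hF0eq]
          exact hv
        exact ⟨hmem f0 List.mem_cons_self, fun v hv => hmem v (List.mem_cons_of_mem _ hv)⟩
    rw [hgA]
    by_cases hng1 : NG = 1
    · rw [if_pos (by simp [hng1])]
      rw [hB, sorted_eq_flatMap cs]
      congr 1
      rw [List.flatMap, List.flatMap]
      congr 1
      apply List.map_congr_left
      intro k _
      rw [hng1, Nat.div_one]
    · rw [if_neg (by simpa using fun h : ((NG : Nat) : Int) = 1 => hng1 (by exact_mod_cast h))]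
      rw [hB]
      exact formula_join cs NG hNGpos hNGdvd

-- ===== VERDICT (by name: the statement is the Claim_ definition above) =====
theorem has_subpattern_spec : Claim_equal_has_subpattern := by
  intro s hdom hpre
  unfold Spec_has_subpattern
  exact (main_eq s (by rwa [ne_eq, String.toList_eq_nil_iff])).symm ▸ rfl
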